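-- pv_equiv track=rewrite | github.com/AIHackerTest/behindsea_Py101-004 | Chap0/project/Upper_Bulls_and_Cows.py | input_format_right
-- ===== SOURCE A (Python) =====
-- def input_format_right(answer_str):
--     """用于判断是否为四位、不重复、数字、首位非零"""
--     if len(answer_str) != 4 or answer_str[0] == "0" or not answer_str.isdecimal():
--         return False
--     else:
--         answer_list = [i for i in answer_str]
--         for ans in answer_list:
--             if answer_list.count(ans) != 1:
--                 return  False
--     return True
-- ===== SOURCE B (Python) =====
-- def input_format_right(answer_str):
--     """用于判断是否为四位、不重复、数字、首位非零"""
--     if len(answer_str) != 4: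
--         return False
--     seen = ""
--     for i, ch in enumerate(answer_str):
--         low = "1" if i == 0 else "0"
--         if not (low <= ch <= "9") or ch in seen:
--             return False
--         seen += ch
--     return True
-- ===== Notes on version B (the rewrite author's own statement) =====
-- stated objective: alternative
-- what changed: A runs three staged guards and then a quadratic counting loop over the whole list; B makes a single fused left-to-right pass with a seen-characters accumulator, checking digit-range (first char '1'-'9', rest '0'-'9') and freshness per character.
import Mathlib
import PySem

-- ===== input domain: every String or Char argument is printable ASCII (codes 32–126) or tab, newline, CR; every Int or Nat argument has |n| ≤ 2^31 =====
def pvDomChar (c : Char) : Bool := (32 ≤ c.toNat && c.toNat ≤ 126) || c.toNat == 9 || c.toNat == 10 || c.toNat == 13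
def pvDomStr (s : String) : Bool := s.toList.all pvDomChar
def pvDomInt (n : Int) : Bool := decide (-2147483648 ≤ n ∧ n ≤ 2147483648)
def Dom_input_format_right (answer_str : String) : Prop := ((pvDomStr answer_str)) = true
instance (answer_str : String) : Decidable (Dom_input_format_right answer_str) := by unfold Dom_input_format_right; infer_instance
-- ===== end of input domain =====

-- B replaces A's staged guards + counting loop by a single fused left-to-right pass with a
-- seen-characters accumulator (alternative decomposition, not claimed faster).

-- ===== PORT A =====
def input_format_right (answer_str : String) : Bool :=
  if (answer_str.toList.length != 4) || (PySem.Str.pyGet? answer_str 0 == some '0')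
      || !PySem.Str.strIsdigit answer_str then
    false
  else
    -- answer_list = [i for i in answer_str]; for ans in answer_list: if count != 1: return False
    let answer_list := answer_str.toList
    if answer_list.any (fun ans => answer_list.count ans != 1) then false
    else true

-- ===== PORT B =====
-- the fused per-character loop of Source B: position i, accumulator seen
def pvAltLoop : List Char → Nat → List Char → Bool
  | [], _, _ => true
  | ch :: rest, i, seen =>
    let low := if i == 0 then '1' else '0'
    if !(low ≤ ch && ch ≤ '9') || seen.contains ch then false
    else pvAltLoop rest (i + 1) (seen ++ [ch])

def input_format_right_alt (answer_str : String) : Bool :=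
  if answer_str.toList.length != 4 then false
  else pvAltLoop answer_str.toList 0 []

-- ===== PRECONDITION & SPEC =====
def Spec_input_format_right (answer_str : String) (out : Bool) : Prop := out = input_format_right_alt answer_str
instance (answer_str : String) (out : Bool) : Decidable (Spec_input_format_right answer_str out) := by unfold Spec_input_format_right; infer_instance

-- ===== CLAIM (what is proved, stated in full; the proofs are below) =====
def Claim_equal_input_format_right : Prop := ∀ (answer_str : String), Dom_input_format_right answer_str → Spec_input_format_right answer_str (input_format_right answer_str)

-- ===== LEMMAS AND PROOFS =====

-- a char is a digit and not '0' iff it lies in '1'..'9'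
theorem one_le_iff (a : Char) :
    ('1' ≤ a ∧ a ≤ '9') ↔ (('0' ≤ a ∧ a ≤ '9') ∧ ¬ a = '0') := by
  have h1 : ('1' ≤ a) ↔ 49 ≤ a.toNat := Iff.rfl
  have h0 : ('0' ≤ a) ↔ 48 ≤ a.toNat := Iff.rfl
  have h9 : (a ≤ '9') ↔ a.toNat ≤ 57 := Iff.rfl
  have he : (a = '0') ↔ a.toNat = 48 := by
    constructor
    · rintro rfl; rfl
    · intro h; exact Char.ext (UInt32.toNat_inj.mp h)
  rw [h1, h0, h9, he]
  omega

-- the counting loop of A detects exactly non-Nodup lists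
theorem any_count_eq_nodup (cs : List Char) :
    (cs.any (fun a => cs.count a != 1) = false) ↔ cs.Nodup := by
  simp only [List.any_eq_false, bne_iff_ne, ne_eq, not_not]
  constructor
  · intro h
    refine List.nodup_iff_count_le_one.2 (fun a => ?_)
    by_cases hm : a ∈ cs
    · exact le_of_eq (h a hm)
    · simp [List.count_eq_zero_of_not_mem hm]
  · intro h a hm
    exact List.count_eq_one_of_mem h hm

-- A on a 4-char string: guards plus no duplicates
theorem input_format_right_char (s : String) (a b c d : Char) (hl : s.toList = [a, b, c, d]) :
    input_format_right s = true ↔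
      ((¬ a = '0' ∧ ('0' ≤ a ∧ a ≤ '9') ∧ ('0' ≤ b ∧ b ≤ '9') ∧ ('0' ≤ c ∧ c ≤ '9') ∧
        ('0' ≤ d ∧ d ≤ '9')) ∧ [a, b, c, d].Nodup) := by
  unfold input_format_right
  simp only [PySem.Str.pyGet?_eq, PySem.Chars.pyGet?_eq_listPyGet?, PySem.Str.strIsdigit, hl]
  by_cases hany : ([a, b, c, d].any fun ans => List.count ans [a, b, c, d] != 1) = true
  · have hnd : ¬ [a, b, c, d].Nodup := fun hn => by
      rw [(any_count_eq_nodup [a, b, c, d]).mpr hn] at hany; exact absurd hany (by simp)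
    simp [hany, hnd]
  · have hnd : [a, b, c, d].Nodup := (any_count_eq_nodup [a, b, c, d]).mp (by simpa using hany)
    simp [Bool.eq_false_iff.mpr hany, hnd, PySem.Chars.strIsdigit, PySem.Chars.isdigit,
      and_assoc]

-- ===== VERDICT (by name: the statement is the Claim_ definition above) =====
theorem input_format_right_spec : Claim_equal_input_format_right := by
  intro s _
  unfold Spec_input_format_right
  by_cases h4 : s.toList.length = 4
  · obtain ⟨a, b, c, d, hl⟩ := List.length_eq_four.mp h4
    apply Bool.eq_iff_iff.mpr
    rw [input_format_right_char s a b c d hl]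
    unfold input_format_right_alt
    simp only [hl, List.length_cons, List.length_nil, bne_self_eq_false, Bool.false_eq_true,
      if_false, pvAltLoop]
    simp only [List.nodup_cons, List.mem_cons, List.not_mem_nil,
      List.nodup_nil, not_or]
    simp
    constructor
    · rintro ⟨⟨hz, ha, hb, hc, hd⟩, ⟨hab, hac, had⟩, ⟨hbc, hbd⟩, hcd⟩
      obtain ⟨ha1, ha9⟩ := (one_le_iff a).mpr ⟨ha, hz⟩
      exact ⟨⟨ha1, ha9⟩, ⟨hb, fun h => hab h.symm⟩,
        ⟨hc, fun h => hac h.symm, fun h => hbc h.symm⟩,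
        hd, fun h => had h.symm, fun h => hbd h.symm, fun h => hcd h.symm⟩
    · rintro ⟨⟨ha1, ha9⟩, ⟨hb, hba⟩, ⟨hc, hca, hcb⟩, hd, hda, hdb, hdc⟩
      obtain ⟨ha, hz⟩ := (one_le_iff a).mp ⟨ha1, ha9⟩
      exact ⟨⟨hz, ha, hb, hc, hd⟩, ⟨fun h => hba h.symm, fun h => hca h.symm, fun h => hda h.symm⟩,
        ⟨fun h => hcb h.symm, fun h => hdb h.symm⟩, fun h => hdc h.symm⟩
  · have h4' : ¬ s.length = 4 := by rwa [String.length_toList] at h4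
    unfold input_format_right input_format_right_alt
    simp [h4']
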